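-- pv_equiv track=rewrite | github.com/TheMoralLowGround/icap-v7-master-11-Feb-2026 | icap-v7-master/classifier/core/title_classfication_v2/utils/merge_utils.py | merge_chunked_results
-- ===== SOURCE A (Python) =====
-- from typing import Dict, List, Tuple, Optional
--
-- def find_label(chunk: Dict[str, List[Tuple[int, int]]], page: int) -> Optional[str]:
--     """Find the label for a given page in a chunk's classification results."""
--     for label, ranges in chunk.items():
--         for s, e in ranges:
--             if s <= page <= e:
--                 return label
--     return None
--
-- def clean_conflicting_overlap(prev_chunk: Dict, label: str, start: int, end: int) -> List[Tuple[int, int]]: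
--     """Clean overlapping pages that have conflicting labels between chunks."""
--     cleaned = []
--     current_start = None
--
--     for pg in range(start, end + 1):
--         prev_label = find_label(prev_chunk, pg)
--
--         # keep page if: no prev label OR same label
--         if prev_label is None or prev_label == label:
--             if current_start is None:
--                 current_start = pg
--         else:
--             if current_start is not None:
--                 cleaned.append((current_start, pg - 1))
--                 current_start = None
--
--     if current_start is not None:
--         cleaned.append((current_start, end))
--
--     return cleaned
--
-- def merge_overlapping_only(ranges: List[Tuple[int, int]]) -> List[Tuple[int, int]]:
--     """Merge only truly overlapping ranges (not adjacent ones)."""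
--     if not ranges:
--         return []
--
--     ranges = sorted(ranges, key=lambda x: x[0])
--     merged = [ranges[0]]
--
--     for s, e in ranges[1:]:
--         last_s, last_e = merged[-1]
--
--         # Merge only when ranges truly overlap
--         if s <= last_e:  # NOT last_e + 1
--             merged[-1] = (last_s, max(last_e, e))
--         else:
--             merged.append((s, e))
--
--     return merged
--
-- def merge_chunked_results(chunked_results: List[Dict]) -> Dict[str, List[Tuple[int, int]]]:
--     """Merge classification results from multiple chunks, resolving conflicts."""
--     final = {}
--     prev_chunk = None
--
--     for chunk in chunked_results:
--         if prev_chunk is None: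
--             for label, ranges in chunk.items():
--                 final[label] = ranges[:]
--             prev_chunk = chunk
--             continue
--
--         for label, ranges in chunk.items():
--             for start, end in ranges:
--                 cleaned = clean_conflicting_overlap(prev_chunk, label, start, end)
--                 for cs, ce in cleaned:
--                     final.setdefault(label, []).append((cs, ce))
--
--         prev_chunk = chunk
--
--     # merge only overlapping ranges
--     for label in final:
--         final[label] = merge_overlapping_only(final[label])
--
--     return final
-- ===== SOURCE B (Python) =====
-- from typing import Dict, List, Tuple
--
-- def _minus_block(a, b, p, q):
--     """[a,b] minus block [p,q] as up to two sorted nonempty intervals."""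
--     if p > q:
--         return [(a, b)]
--     out = []
--     if a <= min(b, p - 1):
--         out.append((a, min(b, p - 1)))
--     if max(a, q + 1) <= b:
--         out.append((max(a, q + 1), b))
--     return out
--
-- def _subtract_all(a, b, blocks):
--     """Pieces of [a,b] not covered by any block (blocks arbitrary)."""
--     pieces = [(a, b)] if a <= b else []
--     for p, q in blocks:
--         pieces = [r for pc in pieces for r in _minus_block(pc[0], pc[1], p, q)]
--     return pieces
--
-- def _partition(chunk):
--     """Disjoint labeled pieces with first-match priority, plus nothing else."""
--     pieces = []   # (start, end, label), pairwise disjoint, nonempty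
--     covered = []  # raw ranges already claimed
--     for lab, ranges in chunk.items():
--         for a, b in ranges:
--             for pa, pb in _subtract_all(a, b, covered):
--                 pieces.append((pa, pb, lab))
--             covered.append((a, b))
--     return pieces
--
-- def _subtract_sorted(lo, hi, blocks):
--     """[lo,hi] minus sorted disjoint blocks, by a linear sweep."""
--     res = []
--     cur = lo
--     for pa, pb in blocks:
--         if cur > hi:
--             break
--         if pb < cur:
--             continue
--         if pa > hi:
--             break
--         if cur < pa:
--             res.append((cur, pa - 1))
--         cur = pb + 1
--     if cur <= hi:
--         res.append((cur, hi))
--     return res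
--
-- def _merge_overlapping_only(ranges):
--     rs = sorted(ranges, key=lambda r: r[0])
--     if not rs:
--         return []
--     done = []
--     cs, ce = rs[0]
--     for s, e in rs[1:]:
--         if s <= ce:
--             ce = max(ce, e)
--         else:
--             done.append((cs, ce))
--             cs, ce = s, e
--     done.append((cs, ce))
--     return done
--
-- def merge_chunked_results(chunked_results: List[Dict]) -> Dict[str, List[Tuple[int, int]]]:
--     final = {}
--     prev_chunk = None
--     for chunk in chunked_results:
--         if prev_chunk is None:
--             for label, ranges in chunk.items():
--                 final[label] = ranges[:]
--         else:
--             pieces = _partition(prev_chunk)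
--             for label, ranges in chunk.items():
--                 conflicts = sorted(((pa, pb) for pa, pb, lab in pieces if lab != label), key=lambda r: r[0])
--                 for start, end in ranges:
--                     for cs, ce in _subtract_sorted(start, end, conflicts):
--                         final.setdefault(label, []).append((cs, ce))
--         prev_chunk = chunk
--     for label in final:
--         final[label] = _merge_overlapping_only(final[label])
--     return final
-- ===== Notes on version B (the rewrite author's own statement) =====
-- stated objective: alternative
-- what changed: A classifies every page of every range individually (find_label per page, then groups kept pages into runs); B partitions the previous chunk into disjoint labelled intervals and subtracts the sorted conflicting intervals from each range with a linear sweep, working per interval instead of per page (it trades A's dependence on page-range width for a dependence on the number of intervals).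
import Mathlib
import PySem

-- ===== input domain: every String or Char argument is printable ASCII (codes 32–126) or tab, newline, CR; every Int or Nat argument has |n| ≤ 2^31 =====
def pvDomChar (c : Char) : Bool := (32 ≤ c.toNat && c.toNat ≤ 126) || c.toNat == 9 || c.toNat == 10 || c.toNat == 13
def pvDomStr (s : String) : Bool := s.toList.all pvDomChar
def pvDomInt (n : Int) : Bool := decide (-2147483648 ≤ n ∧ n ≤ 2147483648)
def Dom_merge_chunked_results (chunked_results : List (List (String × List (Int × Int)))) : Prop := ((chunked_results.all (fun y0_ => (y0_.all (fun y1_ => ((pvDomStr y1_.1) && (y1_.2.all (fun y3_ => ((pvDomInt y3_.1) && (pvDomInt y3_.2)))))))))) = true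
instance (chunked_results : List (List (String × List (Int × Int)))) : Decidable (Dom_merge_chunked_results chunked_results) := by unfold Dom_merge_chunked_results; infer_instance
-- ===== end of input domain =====

-- B replaces A's page-by-page scan of every range (find_label per page) by interval
-- arithmetic: partition the previous chunk into disjoint labelled pieces once, then
-- subtract the conflicting pieces from each range with a sorted sweep: work per interval
-- rather than per page (objective: alternative).

-- ===== PORT A =====

-- find_label: first label in chunk order owning the page
def pvFindLabel (chunk : List (String × List (Int × Int))) (page : Int) : Option String :=
  match chunk with
  | [] => none
  | (lab, rs) :: rest =>
    match rs.find? (fun se => decide (se.1 ≤ page ∧ page ≤ se.2)) with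
    | some _ => some lab
    | none => pvFindLabel rest page

-- 'prev_label is None or prev_label == label' for one page
def pvKeep (prev : List (String × List (Int × Int))) (label : String) (pg : Int) : Bool :=
  decide (pvFindLabel prev pg = none ∨ pvFindLabel prev pg = some label)

-- loop body of clean_conflicting_overlap; state = (cleaned, current_start)
def pvCleanStep (keep : Int → Bool) (st : List (Int × Int) × Option Int) (pg : Int) :
    List (Int × Int) × Option Int :=
  if keep pg then
    match st.2 with
    | none => (st.1, some pg)
    | some _ => st
  else
    match st.2 with
    | some cs => (st.1 ++ [(cs, pg - 1)], none)
    | none => st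

def pvCleanOverlap (prev : List (String × List (Int × Int))) (label : String) (start stop : Int) :
    List (Int × Int) :=
  let st := (PySem.List.pyRange start (stop + 1)).foldl (pvCleanStep (pvKeep prev label)) ([], none)
  match st.2 with
  | some cs => st.1 ++ [(cs, stop)]
  | none => st.1

def pvMergeOverlappingOnly (ranges : List (Int × Int)) : List (Int × Int) :=
  match PySem.List.sorted ranges (fun x => x.1) with
  | [] => []
  | r0 :: rest =>
    rest.foldl (fun merged se =>
      match merged.getLast? with
      | some l => if se.1 ≤ l.2 then merged.dropLast ++ [(l.1, max l.2 se.2)] else merged ++ [se]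
      | none => merged ++ [se]) [r0]

def merge_chunked_results (chunked_results : List (List (String × List (Int × Int)))) : List (String × List (Int × Int)) :=
  -- each Python argument element is a dict: build it from the pairs (type convention)
  let chunks : List (PySem.Dict String (List (Int × Int))) := chunked_results.map PySem.Dict.ofList
  let st := chunks.foldl (fun (st : PySem.Dict String (List (Int × Int)) × Option (PySem.Dict String (List (Int × Int)))) chunk =>
    match st.2 with
    | none => (chunk.items.foldl (fun f p => f.insert p.1 p.2) st.1, some chunk)
    | some prev =>
      (chunk.items.foldl (fun f p =>
        p.2.foldl (fun f se =>
          (pvCleanOverlap prev.items p.1 se.1 se.2).foldl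
            (fun f ce => f.insert p.1 (f.getD p.1 [] ++ [ce])) f) f) st.1, some chunk))
    (PySem.Dict.empty, none)
  st.1.items.map (fun p => (p.1, pvMergeOverlappingOnly p.2))

-- ===== PORT B =====

-- [a,b] minus one block [p,q]: at most two sorted nonempty intervals
def pvMinusBlock (a b p q : Int) : List (Int × Int) :=
  if p > q then [(a, b)]
  else (if a ≤ min b (p - 1) then [(a, min b (p - 1))] else []) ++
       (if max a (q + 1) ≤ b then [(max a (q + 1), b)] else [])

-- pieces of [a,b] not covered by any block
def pvSubtractAll (a b : Int) (blocks : List (Int × Int)) : List (Int × Int) :=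
  blocks.foldl (fun pieces pq => pieces.flatMap (fun pc => pvMinusBlock pc.1 pc.2 pq.1 pq.2))
    (if a ≤ b then [(a, b)] else [])

-- disjoint labelled pieces of a chunk, first-match priority; state = (pieces, covered)
def pvPartition (chunk : List (String × List (Int × Int))) : List (Int × Int × String) :=
  (chunk.foldl (fun (st : List (Int × Int × String) × List (Int × Int)) p =>
    p.2.foldl (fun st ab =>
      (st.1 ++ (pvSubtractAll ab.1 ab.2 st.2).map (fun r => (r.1, r.2, p.1)), st.2 ++ [ab])) st)
    ([], [])).1

-- [cur,hi] minus sorted disjoint blocks, one linear sweep (break/continue as recursion)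
def pvSweep (hi : Int) (cur : Int) (blocks : List (Int × Int)) : List (Int × Int) :=
  match blocks with
  | [] => if cur ≤ hi then [(cur, hi)] else []
  | (pa, pb) :: rest =>
    if cur > hi then []
    else if pb < cur then pvSweep hi cur rest
    else if pa > hi then if cur ≤ hi then [(cur, hi)] else []
    else (if cur < pa then [(cur, pa - 1)] else []) ++ pvSweep hi (pb + 1) rest

def pvConflicts (pieces : List (Int × Int × String)) (label : String) : List (Int × Int) :=
  PySem.List.sorted ((pieces.filter (fun t => decide ¬(t.2.2 = label))).map (fun t => (t.1, t.2.1)))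
    (fun r => r.1)

def pvMergeOverlappingOnlyAlt (ranges : List (Int × Int)) : List (Int × Int) :=
  match PySem.List.sorted ranges (fun r => r.1) with
  | [] => []
  | r0 :: rest =>
    let st := rest.foldl (fun (st : List (Int × Int) × (Int × Int)) se =>
      if se.1 ≤ st.2.2 then (st.1, (st.2.1, max st.2.2 se.2))
      else (st.1 ++ [st.2], se)) ([], r0)
    st.1 ++ [st.2]

def merge_chunked_results_alt (chunked_results : List (List (String × List (Int × Int)))) : List (String × List (Int × Int)) :=
  let chunks : List (PySem.Dict String (List (Int × Int))) := chunked_results.map PySem.Dict.ofList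
  let st := chunks.foldl (fun (st : PySem.Dict String (List (Int × Int)) × Option (PySem.Dict String (List (Int × Int)))) chunk =>
    match st.2 with
    | none => (chunk.items.foldl (fun f p => f.insert p.1 p.2) st.1, some chunk)
    | some prev =>
      let pieces := pvPartition prev.items
      (chunk.items.foldl (fun f p =>
        let conflicts := pvConflicts pieces p.1
        p.2.foldl (fun f se =>
          (pvSweep se.2 se.1 conflicts).foldl
            (fun f ce => f.insert p.1 (f.getD p.1 [] ++ [ce])) f) f) st.1, some chunk))
    (PySem.Dict.empty, none)
  st.1.items.map (fun p => (p.1, pvMergeOverlappingOnlyAlt p.2))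

-- ===== PRECONDITION & SPEC =====
def Spec_merge_chunked_results (chunked_results : List (List (String × List (Int × Int)))) (out : List (String × List (Int × Int))) : Prop := out = merge_chunked_results_alt chunked_results
instance (chunked_results : List (List (String × List (Int × Int)))) (out : List (String × List (Int × Int))) : Decidable (Spec_merge_chunked_results chunked_results out) := by unfold Spec_merge_chunked_results; infer_instance

-- ===== CLAIM (what is proved, stated in full; the proofs are below) =====
def Claim_equal_merge_chunked_results : Prop := ∀ (chunked_results : List (List (String × List (Int × Int)))), Dom_merge_chunked_results chunked_results → Spec_merge_chunked_results chunked_results (merge_chunked_results chunked_results)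

-- ===== LEMMAS AND PROOFS =====

theorem seg_true_some (keep : Int → Bool) :
    ∀ (lo m : Int) (acc : List (Int × Int)) (s0 : Int),
    (∀ pg, lo ≤ pg → pg < m → keep pg = true) →
    (PySem.List.pyRange lo m).foldl (pvCleanStep keep) (acc, some s0) = (acc, some s0) := by
  intro lo m
  generalize hn : (m - lo).toNat = n
  induction n generalizing lo with
  | zero =>
    intro acc s0 h
    rw [PySem.List.pyRange_one_eq_nil (by omega)]
    rfl
  | succ n ih =>
    intro acc s0 h
    have hlt : lo < m := by omega
    rw [PySem.List.pyRange_one_cons hlt]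
    simp only [List.foldl_cons]
    have hk := h lo le_rfl hlt
    simp only [pvCleanStep, hk, if_true]
    exact ih (lo + 1) (by omega) acc s0 (fun pg h1 h2 => h pg (by omega) h2)

theorem seg_true_none (keep : Int → Bool) (lo m : Int) (acc : List (Int × Int))
    (h : ∀ pg, lo ≤ pg → pg < m → keep pg = true) :
    (PySem.List.pyRange lo m).foldl (pvCleanStep keep) (acc, none) =
      (acc, if lo < m then some lo else none) := by
  by_cases hlt : lo < m
  · rw [PySem.List.pyRange_one_cons hlt]
    simp only [List.foldl_cons]
    have hk := h lo le_rfl hlt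
    simp only [pvCleanStep, hk, if_true]
    rw [seg_true_some keep (lo+1) m acc lo (fun pg h1 h2 => h pg (by omega) h2)]
    simp [hlt]
  · rw [PySem.List.pyRange_one_eq_nil (by omega)]
    simp [hlt]

theorem seg_false_none (keep : Int → Bool) :
    ∀ (lo m : Int) (acc : List (Int × Int)),
    (∀ pg, lo ≤ pg → pg < m → keep pg = false) →
    (PySem.List.pyRange lo m).foldl (pvCleanStep keep) (acc, none) = (acc, none) := by
  intro lo m
  generalize hn : (m - lo).toNat = n
  induction n generalizing lo with
  | zero =>
    intro acc h
    rw [PySem.List.pyRange_one_eq_nil (by omega)]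
    rfl
  | succ n ih =>
    intro acc h
    have hlt : lo < m := by omega
    rw [PySem.List.pyRange_one_cons hlt]
    simp only [List.foldl_cons]
    have hk := h lo le_rfl hlt
    simp only [pvCleanStep, hk, if_false, Bool.false_eq_true]
    exact ih (lo + 1) (by omega) acc (fun pg h1 h2 => h pg (by omega) h2)

theorem seg_false_some (keep : Int → Bool) (lo m : Int) (acc : List (Int × Int)) (s0 : Int)
    (hlt : lo < m) (h : ∀ pg, lo ≤ pg → pg < m → keep pg = false) :
    (PySem.List.pyRange lo m).foldl (pvCleanStep keep) (acc, some s0) =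
      (acc ++ [(s0, lo - 1)], none) := by
  rw [PySem.List.pyRange_one_cons hlt]
  simp only [List.foldl_cons]
  have hk := h lo le_rfl hlt
  simp only [pvCleanStep, hk, if_false, Bool.false_eq_true]
  exact seg_false_none keep (lo+1) m _ (fun pg h1 h2 => h pg (by omega) h2)

theorem sweep_of_gt (hi cur : Int) (blocks : List (Int × Int)) (h : hi < cur) :
    pvSweep hi cur blocks = [] := by
  cases blocks with
  | nil => simp [pvSweep]; omega
  | cons b rest => obtain ⟨pa, pb⟩ := b; simp [pvSweep]; omega
def pvCov (r : Int × Int) (pg : Int) : Prop := r.1 ≤ pg ∧ pg ≤ r.2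
def pvCovB (blocks : List (Int × Int)) (pg : Int) : Prop := ∃ r ∈ blocks, pvCov r pg

theorem pvCovB_nil (pg : Int) : ¬ pvCovB [] pg := by simp [pvCovB]

theorem pvCovB_cons (r : Int × Int) (rs : List (Int × Int)) (pg : Int) :
    pvCovB (r :: rs) pg ↔ pvCov r pg ∨ pvCovB rs pg := by simp [pvCovB]

def pvRunsFrom (keep : Int → Bool) (lo hi : Int) (acc : List (Int × Int)) : List (Int × Int) :=
  let st := (PySem.List.pyRange lo (hi + 1)).foldl (pvCleanStep keep) (acc, none)
  match st.2 with
  | some cs => st.1 ++ [(cs, hi)]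
  | none => st.1

theorem runs_eq_sweep (keep : Int → Bool) :
    ∀ (C : List (Int × Int)) (lo hi : Int) (acc : List (Int × Int)),
    (∀ pg, lo ≤ pg → pg ≤ hi → (keep pg = false ↔ pvCovB C pg)) →
    C.Pairwise (fun x y => x.2 < y.1) → (∀ r ∈ C, r.1 ≤ r.2) →
    pvRunsFrom keep lo hi acc = acc ++ pvSweep hi lo C := by
  intro C
  induction C with
  | nil =>
    intro lo hi acc hcov _ _
    have hkeep : ∀ pg, lo ≤ pg → pg < hi + 1 → keep pg = true := by
      intro pg hp1 hp2
      by_contra hf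
      exact pvCovB_nil pg ((hcov pg hp1 (by omega)).mp (by simpa using hf))
    unfold pvRunsFrom
    rw [seg_true_none keep lo (hi+1) acc hkeep]
    by_cases hle : lo ≤ hi
    · simp [pvSweep, hle, show lo < hi + 1 by omega]
    · simp [pvSweep, hle, show ¬ lo < hi + 1 by omega]
  | cons head rest ih =>
    obtain ⟨pa, pb⟩ := head
    intro lo hi acc hcov hpw hne
    have hpapb : pa ≤ pb := hne _ List.mem_cons_self
    have hrest1 : ∀ r ∈ rest, pb < r.1 := fun r hr => (List.pairwise_cons.mp hpw).1 r hr
    by_cases h1 : hi < lo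
    · unfold pvRunsFrom
      rw [PySem.List.pyRange_one_eq_nil (by omega)]
      rw [sweep_of_gt hi lo _ h1]
      simp
    by_cases h2 : pb < lo
    · have hsw : pvSweep hi lo ((pa,pb)::rest) = pvSweep hi lo rest := by
        simp [pvSweep, h1, h2]
      rw [hsw]
      refine ih lo hi acc ?_ (List.pairwise_cons.mp hpw).2 (fun r hr => hne r (List.mem_cons_of_mem _ hr)) 
      intro pg hp1 hp2
      rw [hcov pg hp1 hp2, pvCovB_cons]
      constructor
      · rintro (⟨hc1, hc2⟩ | h) 
        · exact absurd hc2 (by simp; omega)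
        · exact h
      · exact Or.inr
    by_cases h3 : hi < pa
    · have hkeep : ∀ pg, lo ≤ pg → pg < hi + 1 → keep pg = true := by
        intro pg hp1 hp2
        by_contra hf
        rcases (hcov pg hp1 (by omega)).mp (by simpa using hf) with ⟨r, hr, hc1, hc2⟩
        rcases List.mem_cons.mp hr with rfl | hr'
        · simp at hc1; omega
        · have := hrest1 r hr'; omega
      unfold pvRunsFrom
      rw [seg_true_none keep lo (hi+1) acc hkeep]
      have hsw : pvSweep hi lo ((pa,pb)::rest) = [(lo, hi)] := by
        simp [pvSweep, h1, h2, h3]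
      rw [hsw]
      simp [show lo < hi + 1 by omega]
    · -- main case
      simp only [not_lt] at h1 h2 h3
      set a' := max lo pa with ha'
      set b' := min hi pb with hb'
      have hab : a' ≤ b' := by omega
      unfold pvRunsFrom
      rw [PySem.List.pyRange_one_append lo a' (hi+1) (by omega) (by omega),
          PySem.List.pyRange_one_append a' (b'+1) (hi+1) (by omega) (by omega),
          List.foldl_append, List.foldl_append]
      have hkeep1 : ∀ pg, lo ≤ pg → pg < a' → keep pg = true := by
        intro pg hp1 hp2
        by_contra hf
        rcases (hcov pg hp1 (by omega)).mp (by simpa using hf) with ⟨r, hr, hc1, hc2⟩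
        rcases List.mem_cons.mp hr with rfl | hr'
        · simp at hc1 hc2; omega
        · have := hrest1 r hr'; omega
      have hkeep2 : ∀ pg, a' ≤ pg → pg < b' + 1 → keep pg = false := by
        intro pg hp1 hp2
        refine (hcov pg (by omega) (by omega)).mpr ?_
        rw [pvCovB_cons]
        exact Or.inl ⟨by simp; omega, by simp; omega⟩
      rw [seg_true_none keep lo a' acc hkeep1]
      have hlo_a' : lo < a' ↔ lo < pa := by omega
      have hmain : ((PySem.List.pyRange a' (b' + 1)).foldl (pvCleanStep keep)
            (acc, if lo < a' then some lo else none)) =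
          ((acc ++ (if lo < pa then [(lo, pa - 1)] else [])), none) := by
        by_cases hq : lo < pa
        · rw [if_pos (hlo_a'.mpr hq), if_pos hq]
          rw [seg_false_some keep a' (b'+1) acc lo (by omega) hkeep2]
          have : a' - 1 = pa - 1 := by omega
          rw [this]
        · rw [if_neg (by omega), if_neg hq]
          rw [seg_false_none keep a' (b'+1) acc hkeep2]
          simp
      rw [hmain]
      have hsw : pvSweep hi lo ((pa,pb)::rest) =
          (if lo < pa then [(lo, pa - 1)] else []) ++ pvSweep hi (pb+1) rest := by
        simp [pvSweep, show ¬ hi < lo by omega, show ¬ pb < lo by omega, show ¬ hi < pa by omega]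
      rw [hsw]
      set acc' := acc ++ (if lo < pa then [(lo, pa - 1)] else []) with hacc'
      by_cases hq2 : pb ≤ hi
      · have hb'pb : b' = pb := by omega
        rw [hb'pb]
        have := ih (pb+1) hi acc' ?_ (List.pairwise_cons.mp hpw).2
          (fun r hr => hne r (List.mem_cons_of_mem _ hr))
        · rw [show pvRunsFrom keep (pb+1) hi acc' =
              (match ((PySem.List.pyRange (pb+1) (hi+1)).foldl (pvCleanStep keep) (acc', none)).2 with
               | some cs => ((PySem.List.pyRange (pb+1) (hi+1)).foldl (pvCleanStep keep) (acc', none)).1 ++ [(cs, hi)]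
               | none => ((PySem.List.pyRange (pb+1) (hi+1)).foldl (pvCleanStep keep) (acc', none)).1) from rfl] at this
          rw [this, hacc', List.append_assoc]
        · intro pg hp1 hp2
          rw [hcov pg (by omega) hp2, pvCovB_cons]
          constructor
          · rintro (⟨hc1, hc2⟩ | h)
            · exact absurd hc2 (by simp; omega)
            · exact h
          · exact Or.inr
      · have hb'hi : b' = hi := by omega
        rw [hb'hi]
        rw [PySem.List.pyRange_one_eq_nil (show hi + 1 ≤ hi + 1 by omega)]
        rw [sweep_of_gt hi (pb+1) rest (by omega)]
        simpa using hacc'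
def pvDisj (r r' : Int × Int) : Prop := ∀ pg : Int, ¬ (pvCov r pg ∧ pvCov r' pg)

theorem minusBlock_cov (a b p q pg : Int) :
    pvCovB (pvMinusBlock a b p q) pg ↔ (a ≤ pg ∧ pg ≤ b ∧ ¬ (p ≤ pg ∧ pg ≤ q)) := by
  unfold pvMinusBlock
  split_ifs with h1 h2 h3 h4 h5
  all_goals simp [pvCovB, pvCov]
  all_goals omega

theorem minusBlock_nonempty {a b p q : Int} (hab : a ≤ b) {r : Int × Int} (h : r ∈ pvMinusBlock a b p q) :
    r.1 ≤ r.2 := by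
  unfold pvMinusBlock at h
  split_ifs at h with h1 h2 h3 h4 h5
  all_goals simp at h
  all_goals first
    | ((rcases h with h | h) <;> (subst h; simp <;> omega))
    | (subst h; simp <;> omega)

theorem minusBlock_sub {a b p q : Int} {r : Int × Int} (h : r ∈ pvMinusBlock a b p q)
    (pg : Int) (hc : pvCov r pg) : a ≤ pg ∧ pg ≤ b := by
  unfold pvMinusBlock at h
  unfold pvCov at hc
  split_ifs at h with h1 h2 h3 h4 h5
  all_goals simp at h
  all_goals first
    | ((rcases h with h | h) <;> (subst h; simp at hc; omega))
    | (subst h; simp at hc; omega)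

theorem minusBlock_pairwise (a b p q : Int) : (pvMinusBlock a b p q).Pairwise pvDisj := by
  unfold pvMinusBlock
  split_ifs with h1 h2 h3 h4 h5
  all_goals simp [pvDisj, pvCov]
  all_goals (intro pg; omega)
theorem subAll_fold (blocks : List (Int × Int)) :
    ∀ (pieces : List (Int × Int)),
    (∀ r ∈ pieces, r.1 ≤ r.2) → pieces.Pairwise pvDisj →
    (let res := blocks.foldl
        (fun pieces pq => pieces.flatMap (fun pc => pvMinusBlock pc.1 pc.2 pq.1 pq.2)) pieces
     (∀ pg, pvCovB res pg ↔ (pvCovB pieces pg ∧ ¬ pvCovB blocks pg)) ∧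
     (∀ r ∈ res, r.1 ≤ r.2) ∧ res.Pairwise pvDisj) := by
  induction blocks with
  | nil =>
    intro pieces hne hpw
    exact ⟨fun pg => by simp [pvCovB_nil], hne, hpw⟩
  | cons pq rest ih =>
    obtain ⟨p, q⟩ := pq
    intro pieces hne hpw
    simp only [List.foldl_cons]
    set pieces1 := pieces.flatMap (fun pc => pvMinusBlock pc.1 pc.2 p q) with hp1
    have hcov1 : ∀ pg, pvCovB pieces1 pg ↔ (pvCovB pieces pg ∧ ¬ (p ≤ pg ∧ pg ≤ q)) := by
      intro pg
      constructor
      · rintro ⟨r, hr, hc⟩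
        rcases List.mem_flatMap.mp hr with ⟨pc, hpc, hrm⟩
        have hsub := minusBlock_sub hrm pg hc
        have := (minusBlock_cov pc.1 pc.2 p q pg).mp ⟨r, hrm, hc⟩
        exact ⟨⟨pc, hpc, hsub.1, hsub.2⟩, this.2.2⟩
      · rintro ⟨⟨pc, hpc, hc1, hc2⟩, hnb⟩
        rcases (minusBlock_cov pc.1 pc.2 p q pg).mpr ⟨hc1, hc2, hnb⟩ with ⟨r, hrm, hc⟩
        exact ⟨r, List.mem_flatMap.mpr ⟨pc, hpc, hrm⟩, hc⟩
    have hne1 : ∀ r ∈ pieces1, r.1 ≤ r.2 := by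
      intro r hr
      rcases List.mem_flatMap.mp hr with ⟨pc, hpc, hrm⟩
      exact minusBlock_nonempty (hne pc hpc) hrm
    have hpw1 : pieces1.Pairwise pvDisj := by
      rw [hp1, List.pairwise_flatMap]
      refine ⟨fun pc _ => minusBlock_pairwise pc.1 pc.2 p q, ?_⟩
      refine hpw.imp_of_mem ?_
      intro pc1 pc2 _ _ hd
      intro x hx y hy pg hcc
      exact hd pg ⟨minusBlock_sub hx pg hcc.1, minusBlock_sub hy pg hcc.2⟩
    obtain ⟨c1, c2, c3⟩ := ih pieces1 hne1 hpw1
    refine ⟨?_, c2, c3⟩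
    intro pg
    rw [c1 pg, hcov1 pg, pvCovB_cons]
    unfold pvCov
    tauto

theorem subtractAll_props (a b : Int) (blocks : List (Int × Int)) :
    (∀ pg, pvCovB (pvSubtractAll a b blocks) pg ↔ (a ≤ pg ∧ pg ≤ b ∧ ¬ pvCovB blocks pg)) ∧
    (∀ r ∈ pvSubtractAll a b blocks, r.1 ≤ r.2) ∧
    (pvSubtractAll a b blocks).Pairwise pvDisj := by
  have hne : ∀ r ∈ (if a ≤ b then [(a, b)] else [] : List (Int × Int)), r.1 ≤ r.2 := by
    split_ifs with h
    · intro r hr; simp at hr; subst hr; simpa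
    · intro r hr; simp at hr
  have hpw : (if a ≤ b then [(a, b)] else [] : List (Int × Int)).Pairwise pvDisj := by
    split_ifs <;> simp
  obtain ⟨c1, c2, c3⟩ := subAll_fold blocks _ hne hpw
  refine ⟨?_, c2, c3⟩
  intro pg
  rw [pvSubtractAll, c1 pg]
  have : pvCovB (if a ≤ b then [(a, b)] else []) pg ↔ (a ≤ pg ∧ pg ≤ b) := by
    split_ifs with h
    · simp [pvCovB, pvCov]
    · simp [pvCovB]; omega
  rw [this]
  tauto
def pvCovT (t : Int × Int × String) (pg : Int) : Prop := t.1 ≤ pg ∧ pg ≤ t.2.1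
def pvDisjT (t t' : Int × Int × String) : Prop := ∀ pg : Int, ¬ (pvCovT t pg ∧ pvCovT t' pg)

def pvFirstLabel (es : List (String × (Int × Int))) (pg : Int) : Option String :=
  match es with
  | [] => none
  | (lab, ab) :: rest => if ab.1 ≤ pg ∧ pg ≤ ab.2 then some lab else pvFirstLabel rest pg

def pvFlatten (chunk : List (String × List (Int × Int))) : List (String × (Int × Int)) :=
  chunk.flatMap (fun p => p.2.map (fun ab => (p.1, ab)))

theorem partition_inv (es : List (String × (Int × Int))) :
    ∀ (pieces : List (Int × Int × String)) (covered : List (Int × Int)),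
    (∀ pg, pvCovB covered pg ↔ ∃ t ∈ pieces, pvCovT t pg) →
    pieces.Pairwise pvDisjT → (∀ t ∈ pieces, t.1 ≤ t.2.1) →
    (let res := es.foldl (fun (st : List (Int × Int × String) × List (Int × Int)) e =>
        (st.1 ++ (pvSubtractAll e.2.1 e.2.2 st.2).map (fun r => (r.1, r.2, e.1)), st.2 ++ [e.2]))
        (pieces, covered)
     (∀ pg, pvCovB res.2 pg ↔ ∃ t ∈ res.1, pvCovT t pg) ∧
     res.1.Pairwise pvDisjT ∧ (∀ t ∈ res.1, t.1 ≤ t.2.1) ∧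
     (∀ pg l, (∃ t ∈ res.1, pvCovT t pg ∧ t.2.2 = l) ↔
       ((∃ t ∈ pieces, pvCovT t pg ∧ t.2.2 = l) ∨
        (¬ pvCovB covered pg ∧ pvFirstLabel es pg = some l)))) := by
  induction es with
  | nil =>
    intro pieces covered hcv hpw hne
    refine ⟨hcv, hpw, hne, ?_⟩
    intro pg l
    simp [pvFirstLabel]
  | cons e rest ih =>
    obtain ⟨lab0, a, b⟩ := e
    intro pieces covered hcv hpw hne
    simp only [List.foldl_cons]
    obtain ⟨s1, s2, s3⟩ := subtractAll_props a b covered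
    set newp := (pvSubtractAll a b covered).map (fun r => (r.1, r.2, lab0)) with hnewp
    set pieces1 := pieces ++ newp with hp1
    set covered1 := covered ++ [(a, b)] with hc1
    have hnewcov : ∀ pg l, (∃ t ∈ newp, pvCovT t pg ∧ t.2.2 = l) ↔
        (a ≤ pg ∧ pg ≤ b ∧ ¬ pvCovB covered pg ∧ l = lab0) := by
      intro pg l
      constructor
      · rintro ⟨t, ht, hc, hl⟩
        rcases List.mem_map.mp ht with ⟨r, hr, rfl⟩
        have := (s1 pg).mp ⟨r, hr, hc.1, hc.2⟩
        exact ⟨this.1, this.2.1, this.2.2, hl.symm⟩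
      · rintro ⟨hp1', hp2', hp3', hl⟩
        subst hl
        rcases (s1 pg).mpr ⟨hp1', hp2', hp3'⟩ with ⟨r, hr, hc⟩
        exact ⟨(r.1, r.2, _), List.mem_map.mpr ⟨r, hr, rfl⟩, hc, rfl⟩
    have hnewcov' : ∀ pg, (∃ t ∈ newp, pvCovT t pg) ↔
        (a ≤ pg ∧ pg ≤ b ∧ ¬ pvCovB covered pg) := by
      intro pg
      constructor
      · rintro ⟨t, ht, hc⟩
        have := (hnewcov pg t.2.2).mp ⟨t, ht, hc, rfl⟩
        exact ⟨this.1, this.2.1, this.2.2.1⟩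
      · rintro ⟨h1', h2', h3'⟩
        rcases (hnewcov pg lab0).mpr ⟨h1', h2', h3', rfl⟩ with ⟨t, ht, hc, _⟩
        exact ⟨t, ht, hc⟩
    have hcv1 : ∀ pg, pvCovB covered1 pg ↔ ∃ t ∈ pieces1, pvCovT t pg := by
      intro pg
      rw [hc1, hp1]
      constructor
      · intro h
        rcases h with ⟨r, hr, hc⟩
        rcases List.mem_append.mp hr with hr' | hr'
        · rcases (hcv pg).mp ⟨r, hr', hc⟩ with ⟨t, ht, htc⟩
          exact ⟨t, List.mem_append_left _ ht, htc⟩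
        · simp at hr'; subst hr'
          by_cases hcov : pvCovB covered pg
          · rcases (hcv pg).mp hcov with ⟨t, ht, htc⟩
            exact ⟨t, List.mem_append_left _ ht, htc⟩
          · rcases (hnewcov' pg).mpr ⟨hc.1, hc.2, hcov⟩ with ⟨t, ht, htc⟩
            exact ⟨t, List.mem_append_right _ ht, htc⟩
      · rintro ⟨t, ht, htc⟩
        rcases List.mem_append.mp ht with ht' | ht'
        · rcases (hcv pg).mpr ⟨t, ht', htc⟩ with ⟨r, hr, hc⟩
          exact ⟨r, List.mem_append_left _ hr, hc⟩
        · have := (hnewcov' pg).mp ⟨t, ht', htc⟩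
          exact ⟨(a, b), List.mem_append_right _ (by simp), this.1, this.2.1⟩
    have hpw1 : pieces1.Pairwise pvDisjT := by
      rw [hp1, List.pairwise_append]
      refine ⟨hpw, ?_, ?_⟩
      · rw [hnewp, List.pairwise_map]
        refine s3.imp_of_mem ?_
        intro r1 r2 _ _ hd pg hcc
        exact hd pg ⟨⟨hcc.1.1, hcc.1.2⟩, ⟨hcc.2.1, hcc.2.2⟩⟩
      · intro t1 ht1 t2 ht2 pg hcc
        have h1 := (hcv pg).mp
        have hold : pvCovB covered pg := (hcv pg).mpr ⟨t1, ht1, hcc.1⟩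
        have := (hnewcov' pg).mp ⟨t2, ht2, hcc.2⟩
        exact this.2.2 hold
    have hne1 : ∀ t ∈ pieces1, t.1 ≤ t.2.1 := by
      intro t ht
      rcases List.mem_append.mp ht with ht' | ht'
      · exact hne t ht'
      · rcases List.mem_map.mp ht' with ⟨r, hr, rfl⟩
        exact s2 r hr
    obtain ⟨c1, c2, c3, c4⟩ := ih pieces1 covered1 hcv1 hpw1 hne1
    refine ⟨c1, c2, c3, ?_⟩
    intro pg l
    rw [c4 pg l]
    have hsplit : (∃ t ∈ pieces1, pvCovT t pg ∧ t.2.2 = l) ↔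
        ((∃ t ∈ pieces, pvCovT t pg ∧ t.2.2 = l) ∨ (a ≤ pg ∧ pg ≤ b ∧ ¬ pvCovB covered pg ∧ l = lab0)) := by
      rw [hp1]
      constructor
      · rintro ⟨t, ht, hc⟩
        rcases List.mem_append.mp ht with ht' | ht'
        · exact Or.inl ⟨t, ht', hc⟩
        · exact Or.inr ((hnewcov pg l).mp ⟨t, ht', hc⟩)
      · rintro (⟨t, ht, hc⟩ | h)
        · exact ⟨t, List.mem_append_left _ ht, hc⟩
        · rcases (hnewcov pg l).mpr h with ⟨t, ht, hc⟩
          exact ⟨t, List.mem_append_right _ ht, hc⟩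
    have hcov1' : pvCovB covered1 pg ↔ (pvCovB covered pg ∨ (a ≤ pg ∧ pg ≤ b)) := by
      rw [hc1]
      constructor
      · rintro ⟨r, hr, hc⟩
        rcases List.mem_append.mp hr with hr' | hr'
        · exact Or.inl ⟨r, hr', hc⟩
        · simp at hr'; subst hr'; exact Or.inr ⟨hc.1, hc.2⟩
      · rintro (⟨r, hr, hc⟩ | h)
        · exact ⟨r, List.mem_append_left _ hr, hc⟩
        · exact ⟨(a, b), List.mem_append_right _ (by simp), h.1, h.2⟩
    rw [hsplit, hcov1']
    have hfl : pvFirstLabel ((lab0, (a, b)) :: rest) pg =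
        if a ≤ pg ∧ pg ≤ b then some lab0 else pvFirstLabel rest pg := rfl
    rw [hfl]
    by_cases hab : a ≤ pg ∧ pg ≤ b
    · rw [if_pos hab]
      constructor
      · rintro ((h | h) | h)
        · exact Or.inl h
        · exact Or.inr ⟨h.2.2.1, by rw [h.2.2.2]⟩
        · exact absurd (Or.inr hab) h.1
      · rintro (h | h)
        · exact Or.inl (Or.inl h)
        · exact Or.inl (Or.inr ⟨hab.1, hab.2, h.1, by injection h.2 with h'; exact h'.symm⟩)
    · rw [if_neg hab]
      constructor
      · rintro ((h | h) | h)
        · exact Or.inl h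
        · exact absurd ⟨h.1, h.2.1⟩ hab
        · exact Or.inr ⟨fun hc => h.1 (Or.inl hc), h.2⟩
      · rintro (h | h)
        · exact Or.inl (Or.inl h)
        · refine Or.inr ⟨fun hc => ?_, h.2⟩
          rcases hc with hc | hc
          · exact h.1 hc
          · exact hab hc
theorem partition_eq_fold_flatten (chunk : List (String × List (Int × Int))) :
    ∀ (st : List (Int × Int × String) × List (Int × Int)),
    (chunk.foldl (fun (st : List (Int × Int × String) × List (Int × Int)) p =>
      p.2.foldl (fun st ab =>
        (st.1 ++ (pvSubtractAll ab.1 ab.2 st.2).map (fun r => (r.1, r.2, p.1)), st.2 ++ [ab])) st)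
      st)
    = (pvFlatten chunk).foldl (fun (st : List (Int × Int × String) × List (Int × Int)) e =>
        (st.1 ++ (pvSubtractAll e.2.1 e.2.2 st.2).map (fun r => (r.1, r.2, e.1)), st.2 ++ [e.2]))
        st := by
  induction chunk with
  | nil => intro st; rfl
  | cons p rest ih =>
    intro st
    simp only [List.foldl_cons, pvFlatten, List.flatMap_cons, List.foldl_append]
    rw [← pvFlatten, ← ih, List.foldl_map]

theorem findLabel_eq_firstLabel (chunk : List (String × List (Int × Int))) (pg : Int) :
    pvFindLabel chunk pg = pvFirstLabel (pvFlatten chunk) pg := by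
  induction chunk with
  | nil => rfl
  | cons p rest ih =>
    obtain ⟨lab, rs⟩ := p
    show (match rs.find? (fun se => decide (se.1 ≤ pg ∧ pg ≤ se.2)) with
          | some _ => some lab
          | none => pvFindLabel rest pg) = _
    simp only [pvFlatten, List.flatMap_cons]
    rw [← pvFlatten]
    induction rs with
    | nil => simpa using ih
    | cons ab tl ihr =>
      by_cases hc : ab.1 ≤ pg ∧ pg ≤ ab.2
      · simp [List.find?_cons, hc, pvFirstLabel]
      · have hd : decide (ab.1 ≤ pg ∧ pg ≤ ab.2) = false := by simpa using hc
        simp only [List.find?_cons, hd]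
        simpa [pvFirstLabel, hc] using ihr

-- the three facts feeding the sweep
theorem partition_facts (prev : List (String × List (Int × Int))) :
    (∀ pg l, (∃ t ∈ pvPartition prev, pvCovT t pg ∧ t.2.2 = l) ↔ pvFindLabel prev pg = some l) ∧
    (pvPartition prev).Pairwise pvDisjT ∧ (∀ t ∈ pvPartition prev, t.1 ≤ t.2.1) := by
  have h0 : ∀ pg : Int, pvCovB [] pg ↔ ∃ t ∈ ([] : List (Int × Int × String)), pvCovT t pg := by
    simp [pvCovB]
  obtain ⟨c1, c2, c3, c4⟩ := partition_inv (pvFlatten prev) [] [] h0 (by simp) (by simp)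
  have hpart : pvPartition prev =
      ((pvFlatten prev).foldl (fun (st : List (Int × Int × String) × List (Int × Int)) e =>
        (st.1 ++ (pvSubtractAll e.2.1 e.2.2 st.2).map (fun r => (r.1, r.2, e.1)), st.2 ++ [e.2]))
        ([], [])).1 := by
    rw [pvPartition, partition_eq_fold_flatten]
  rw [hpart]
  refine ⟨?_, c2, c3⟩
  intro pg l
  rw [c4 pg l, findLabel_eq_firstLabel]
  simp [pvCovB]

theorem keep_false_iff (prev : List (String × List (Int × Int))) (label : String) (pg : Int) :
    pvKeep prev label pg = false ↔ ∃ l, pvFindLabel prev pg = some l ∧ l ≠ label := by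
  unfold pvKeep
  cases h : pvFindLabel prev pg with
  | none => simp [h]
  | some l' =>
    by_cases hl : l' = label <;> simp [h, hl]

theorem conflicts_cov (prev : List (String × List (Int × Int))) (label : String) (pg : Int) :
    pvCovB (pvConflicts (pvPartition prev) label) pg ↔ pvKeep prev label pg = false := by
  obtain ⟨g1, _, _⟩ := partition_facts prev
  rw [keep_false_iff]
  unfold pvConflicts pvCovB
  constructor
  · rintro ⟨r, hr, hc⟩
    have hr' := (PySem.List.sorted_perm _ _ false).mem_iff.mp hr
    rcases List.mem_map.mp hr' with ⟨t, ht, rfl⟩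
    have htf := List.mem_filter.mp ht
    refine ⟨t.2.2, (g1 pg t.2.2).mp ⟨t, htf.1, ⟨hc.1, hc.2⟩, rfl⟩, by simpa using htf.2⟩
  · rintro ⟨l, hl, hne⟩
    rcases (g1 pg l).mpr hl with ⟨t, ht, hc, hlab⟩
    refine ⟨(t.1, t.2.1), ?_, hc.1, hc.2⟩
    refine (PySem.List.sorted_perm _ _ false).mem_iff.mpr ?_
    exact List.mem_map.mpr ⟨t, List.mem_filter.mpr ⟨ht, by simp [hlab, hne]⟩, rfl⟩

theorem conflicts_nonempty (prev : List (String × List (Int × Int))) (label : String) :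
    ∀ r ∈ pvConflicts (pvPartition prev) label, r.1 ≤ r.2 := by
  obtain ⟨_, _, g3⟩ := partition_facts prev
  intro r hr
  have hr' := (PySem.List.sorted_perm _ _ false).mem_iff.mp hr
  rcases List.mem_map.mp hr' with ⟨t, ht, rfl⟩
  exact g3 t (List.mem_filter.mp ht).1

theorem conflicts_chain (prev : List (String × List (Int × Int))) (label : String) :
    (pvConflicts (pvPartition prev) label).Pairwise (fun x y => x.2 < y.1) := by
  obtain ⟨_, g2, g3⟩ := partition_facts prev
  have hM : (((pvPartition prev).filter (fun t => decide ¬(t.2.2 = label))).map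
      (fun t => (t.1, t.2.1)) : List (Int × Int)).Pairwise pvDisj := by
    rw [List.pairwise_map]
    refine (List.Pairwise.sublist List.filter_sublist g2).imp ?_
    intro t1 t2 hd pg hcc
    exact hd pg ⟨⟨hcc.1.1, hcc.1.2⟩, ⟨hcc.2.1, hcc.2.2⟩⟩
  have hsym : ∀ {x y : Int × Int}, pvDisj x y → pvDisj y x := by
    intro x y h pg hc; exact h pg ⟨hc.2, hc.1⟩
  have hL : (pvConflicts (pvPartition prev) label).Pairwise pvDisj :=
    ((PySem.List.sorted_perm _ _ false).pairwise_iff hsym).mpr hM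
  have hle : (pvConflicts (pvPartition prev) label).Pairwise (fun x y : Int × Int => x.1 ≤ y.1) :=
    PySem.List.sorted_pairwise _ _
  have hne : ∀ r ∈ pvConflicts (pvPartition prev) label, r.1 ≤ r.2 :=
    conflicts_nonempty prev label
  refine (hle.and hL).imp_of_mem ?_
  intro x y hx hy h
  by_contra hlt
  exact h.2 y.1 ⟨⟨by omega, by omega⟩, ⟨le_refl _, hne y hy⟩⟩

theorem clean_eq_sweep (prev : List (String × List (Int × Int))) (label : String) (lo hi : Int) :
    pvCleanOverlap prev label lo hi = pvSweep hi lo (pvConflicts (pvPartition prev) label) := by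
  have h : pvCleanOverlap prev label lo hi = pvRunsFrom (pvKeep prev label) lo hi [] := rfl
  rw [h, runs_eq_sweep (pvKeep prev label) (pvConflicts (pvPartition prev) label) lo hi []
      (fun pg _ _ => by rw [conflicts_cov]) (conflicts_chain prev label)
      (conflicts_nonempty prev label)]
  simp
theorem mergeFold_eq (rest : List (Int × Int)) :
    ∀ (done : List (Int × Int)) (cur : Int × Int),
    rest.foldl (fun merged se =>
      match merged.getLast? with
      | some l => if se.1 ≤ l.2 then merged.dropLast ++ [(l.1, max l.2 se.2)] else merged ++ [se]
      | none => merged ++ [se]) (done ++ [cur])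
    = (rest.foldl (fun (st : List (Int × Int) × (Int × Int)) se =>
        if se.1 ≤ st.2.2 then (st.1, (st.2.1, max st.2.2 se.2))
        else (st.1 ++ [st.2], se)) (done, cur)).1
      ++ [(rest.foldl (fun (st : List (Int × Int) × (Int × Int)) se =>
        if se.1 ≤ st.2.2 then (st.1, (st.2.1, max st.2.2 se.2))
        else (st.1 ++ [st.2], se)) (done, cur)).2] := by
  induction rest with
  | nil => intro done cur; rfl
  | cons se tl ih =>
    intro done cur
    simp only [List.foldl_cons, List.getLast?_concat, List.dropLast_concat]
    by_cases hle : se.1 ≤ cur.2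
    · simp only [if_pos hle]
      exact ih done (cur.1, max cur.2 se.2)
    · simp only [if_neg hle]
      simpa [List.append_assoc] using ih (done ++ [cur]) se

theorem mergeAlt_eq (ranges : List (Int × Int)) :
    pvMergeOverlappingOnlyAlt ranges = pvMergeOverlappingOnly ranges := by
  unfold pvMergeOverlappingOnly pvMergeOverlappingOnlyAlt
  cases h : PySem.List.sorted ranges (fun r => r.1) with
  | nil => rfl
  | cons r0 rest =>
    have := mergeFold_eq rest [] r0
    simpa using this.symm

theorem main_eq (cr : List (List (String × List (Int × Int)))) :
    merge_chunked_results cr = merge_chunked_results_alt cr := by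
  unfold merge_chunked_results merge_chunked_results_alt
  have hm : pvMergeOverlappingOnlyAlt = pvMergeOverlappingOnly := by
    funext r
    exact mergeAlt_eq r
  have h : pvCleanOverlap = fun prev label lo hi => pvSweep hi lo (pvConflicts (pvPartition prev) label) := by
    funext prev label lo hi
    exact clean_eq_sweep prev label lo hi
  rw [h, hm]

-- ===== VERDICT (by name: the statement is the Claim_ definition above) =====
theorem merge_chunked_results_spec : Claim_equal_merge_chunked_results := by
  intro cr _
  unfold Spec_merge_chunked_results
  exact main_eq cr
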